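-- pv_equiv track=rewrite | github.com/LynxTWO/mix-marriage-offline | src/mmo/core/render_plan.py | _policy_from_targets
-- ===== SOURCE A (Python) =====
-- from typing import Any
--
-- def _coerce_str(value: Any) -> str:
--     if isinstance(value, str):
--         return value
--     return ""
--
-- def _policy_from_targets(rows: list[dict[str, Any]], key: str) -> str | None:
--     values: set[str] = set()
--     for row in rows:
--         normalized = _coerce_str(row.get(key)).strip()
--         if normalized:
--             values.add(normalized)
--     if len(values) == 1:
--         return next(iter(values))
--     return None
-- ===== SOURCE B (Python) =====
-- from typing import Any
--
-- def _coerce_str(value: Any) -> str: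
--     if isinstance(value, str):
--         return value
--     return ""
--
-- def _policy_from_targets(rows: list[dict[str, Any]], key: str) -> str | None:
--     # Single candidate with early exit instead of accumulating a set.
--     candidate = None
--     for row in rows:
--         v = _coerce_str(row.get(key)).strip()
--         if not v:
--             continue
--         if candidate is None:
--             candidate = v
--         elif v != candidate:
--             return None
--     return candidate
-- ===== Notes on version B (the rewrite author's own statement) =====
-- stated objective: simpler
-- what changed: B keeps a single candidate scalar and returns None immediately on the first disagreeing non-empty value, instead of accumulating a set of all distinct values and testing its cardinality after the loop.
import Mathlib
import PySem

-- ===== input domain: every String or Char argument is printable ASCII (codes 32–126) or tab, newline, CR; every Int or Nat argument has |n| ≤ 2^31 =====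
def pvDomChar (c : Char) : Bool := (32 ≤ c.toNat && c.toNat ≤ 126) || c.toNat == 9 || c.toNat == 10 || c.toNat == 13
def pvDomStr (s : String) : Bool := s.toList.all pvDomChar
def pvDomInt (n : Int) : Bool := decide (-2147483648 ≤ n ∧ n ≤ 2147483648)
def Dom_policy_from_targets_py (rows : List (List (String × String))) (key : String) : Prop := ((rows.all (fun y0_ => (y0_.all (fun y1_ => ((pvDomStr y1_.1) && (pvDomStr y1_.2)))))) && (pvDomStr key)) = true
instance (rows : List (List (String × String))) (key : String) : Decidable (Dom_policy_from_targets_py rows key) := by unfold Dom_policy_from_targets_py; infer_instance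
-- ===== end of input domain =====

-- B replaces A's accumulated set + cardinality test by a single candidate with an early exit (simpler).


-- ===== PORT A =====
-- normalized = _coerce_str(row.get(key)).strip()  (row.get returns None → "")
def pvNorm (row : List (String × String)) (key : String) : String :=
  PySem.Str.strip (((PySem.Dict.mk row).get? key).getD "")

-- the loop body: 'if normalized: values.add(normalized)'
def pvStepA (key : String) (values : PySem.Set String) (row : List (String × String)) : PySem.Set String :=
  let normalized := pvNorm row key
  if normalized ≠ "" then PySem.Set.add values normalized else values

def policy_from_targets_py (rows : List (List (String × String))) (key : String) : Option String :=
  let values : PySem.Set String := rows.foldl (pvStepA key) PySem.Set.empty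
  if PySem.Set.len values = 1 then values.head? else none

-- ===== PORT B =====
def pvGoB (key : String) (cand : Option String) : List (List (String × String)) → Option String
  | [] => cand
  | row :: rest =>
    let v := pvNorm row key
    if v = "" then pvGoB key cand rest
    else
      match cand with
      | none => pvGoB key (some v) rest
      | some c => if v = c then pvGoB key (some c) rest else none

def policy_from_targets_py_alt (rows : List (List (String × String))) (key : String) : Option String :=
  pvGoB key none rows

-- ===== PRECONDITION & SPEC =====
def Spec_policy_from_targets_py (rows : List (List (String × String))) (key : String) (out : Option String) : Prop := out = policy_from_targets_py_alt rows key
instance (rows : List (List (String × String))) (key : String) (out : Option String) : Decidable (Spec_policy_from_targets_py rows key out) := by unfold Spec_policy_from_targets_py; infer_instance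

-- ===== CLAIM (what is proved, stated in full; the proofs are below) =====
def Claim_equal_policy_from_targets_py : Prop := ∀ (rows : List (List (String × String))) (key : String), Dom_policy_from_targets_py rows key → Spec_policy_from_targets_py rows key (policy_from_targets_py rows key)

-- ===== LEMMAS AND PROOFS =====

lemma pvLen_add_ge (s : PySem.Set String) (x : String) : s.length ≤ (PySem.Set.add s x).length := by
  simp only [PySem.Set.add]
  split <;> simp

lemma pvLen_fold_ge (key : String) (rows : List (List (String × String))) (s : PySem.Set String) :
    s.length ≤ (rows.foldl (pvStepA key) s).length := by
  induction rows generalizing s with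
  | nil => simp
  | cons row rest ih =>
    refine le_trans ?_ (ih (pvStepA key s row))
    simp only [pvStepA]
    split
    · exact pvLen_add_ge s _
    · exact le_rfl

-- main invariant: starting from matching states (empty/none or singleton/some c),
-- A's final cardinality test agrees with B's candidate recursion.
lemma pvMain (key : String) (rows : List (List (String × String))) (s : PySem.Set String)
    (cand : Option String)
    (h : (cand = none ∧ s = []) ∨ (∃ c, cand = some c ∧ s = [c])) :
    (if PySem.Set.len (rows.foldl (pvStepA key) s) = 1 then (rows.foldl (pvStepA key) s).head? else none)
      = pvGoB key cand rows := by
  induction rows generalizing s cand with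
  | nil =>
    rcases h with ⟨hc, hs⟩ | ⟨c, hc, hs⟩ <;>
      simp [hc, hs, pvGoB, PySem.Set.len]
  | cons row rest ih =>
    simp only [List.foldl_cons, pvGoB]
    by_cases hv : pvNorm row key = ""
    · have hstep : pvStepA key s row = s := by simp [pvStepA, hv]
      rw [hstep]
      simp only [hv]
      exact ih s cand h
    · simp only [if_neg hv]
      rcases h with ⟨hc, hs⟩ | ⟨c, hc, hs⟩
      · subst hc; subst hs
        have hstep : pvStepA key ([] : PySem.Set String) row = [pvNorm row key] := by
          simp [pvStepA, hv, PySem.Set.add, PySem.Set.contains]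
        rw [hstep]
        exact ih _ (some (pvNorm row key)) (Or.inr ⟨_, rfl, rfl⟩)
      · subst hc; subst hs
        by_cases heq : pvNorm row key = c
        · have hstep : pvStepA key [c] row = [c] := by
            simp [pvStepA, heq, PySem.Set.add, PySem.Set.contains]
          rw [hstep]
          simp only [heq]
          exact ih [c] (some c) (Or.inr ⟨c, rfl, rfl⟩)
        · have hstep : pvStepA key [c] row = [c, pvNorm row key] := by
            simp only [pvStepA, hv, ne_eq, not_false_iff, if_true]
            simp [PySem.Set.add, PySem.Set.contains, heq]
          rw [hstep]
          simp only [heq]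
          have h2 : 2 ≤ (rest.foldl (pvStepA key) [c, pvNorm row key]).length :=
            pvLen_fold_ge key rest [c, pvNorm row key]
          have : PySem.Set.len (rest.foldl (pvStepA key) [c, pvNorm row key]) ≠ 1 := by
            simp only [PySem.Set.len]
            omega
          rw [if_neg this]; simp

-- ===== VERDICT (by name: the statement is the Claim_ definition above) =====
theorem policy_from_targets_py_spec : Claim_equal_policy_from_targets_py := by
  intro rows key _
  unfold Spec_policy_from_targets_py policy_from_targets_py policy_from_targets_py_alt
  exact pvMain key rows [] none (Or.inl ⟨rfl, rfl⟩)
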